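-- pv_equiv track=rewrite | github.com/esun-ai/phonetic_mlm | src/dataset.py | _obtain_correct_tokens
-- ===== SOURCE A (Python) =====
-- def _obtain_correct_tokens(typo, text2token, tokens):
--     correct_tokens = []
--     for char_position, token_index in enumerate(text2token):
--         if token_index is None:
--             continue
--
--         correct_token = tokens[token_index]
--         for typo_word, correct_word, start, end in typo:
--             if start <= char_position < end:
--                 correct_token = correct_word
--                 break
--
--         if token_index >= len(correct_tokens):  # append是參照token level而非char level
--             correct_tokens.append(correct_token)
--     return correct_tokens
-- ===== SOURCE B (Python) =====
-- def _obtain_correct_tokens(typo, text2token, tokens):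
--     n = len(text2token)
--     # one pass over typo: first-match correction per char position
--     fix = [None] * n
--     for _typo_word, correct_word, start, end in typo:
--         for p in range(max(start, 0), min(end, n)):
--             if fix[p] is None:
--                 fix[p] = correct_word
--     correct_tokens = []
--     for char_position, token_index in enumerate(text2token):
--         if token_index is None:
--             continue
--         if token_index >= len(correct_tokens):
--             correct_tokens.append(fix[char_position] if fix[char_position] is not None
--                                   else tokens[token_index])
--     return correct_tokens
-- ===== Notes on version B (the rewrite author's own statement) =====
-- stated objective: faster
-- what changed: Instead of scanning the whole typo list for every char position, B precomputes in one pass a per-position correction array (first interval wins, intervals clamped to the text), then does a single scan over text2token.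
import Mathlib
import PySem

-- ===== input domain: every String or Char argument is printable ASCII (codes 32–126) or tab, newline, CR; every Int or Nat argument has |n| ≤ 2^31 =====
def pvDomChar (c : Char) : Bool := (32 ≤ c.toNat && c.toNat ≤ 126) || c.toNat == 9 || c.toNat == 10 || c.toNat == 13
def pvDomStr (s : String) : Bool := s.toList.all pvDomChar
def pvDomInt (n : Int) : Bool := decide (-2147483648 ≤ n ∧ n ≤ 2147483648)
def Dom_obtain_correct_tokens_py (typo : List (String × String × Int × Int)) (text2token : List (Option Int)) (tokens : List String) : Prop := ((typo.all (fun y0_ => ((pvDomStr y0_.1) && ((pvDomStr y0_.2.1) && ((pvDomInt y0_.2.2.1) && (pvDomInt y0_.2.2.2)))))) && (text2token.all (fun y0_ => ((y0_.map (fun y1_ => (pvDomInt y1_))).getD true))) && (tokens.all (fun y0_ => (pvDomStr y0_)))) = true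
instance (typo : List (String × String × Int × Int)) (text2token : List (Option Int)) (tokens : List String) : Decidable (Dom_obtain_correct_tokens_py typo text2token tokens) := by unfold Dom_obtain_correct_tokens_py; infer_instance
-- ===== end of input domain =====

-- B replaces A's per-character scan of the whole typo list by a precomputed
-- per-position correction array built in one pass over typo (objective: faster).

-- ===== PORT A =====
-- inner 'for typo_word, correct_word, start, end in typo: if start <= p < end: … break'
def pvInnerA (typo : List (String × String × Int × Int)) (p : Int) (ct : String) : String :=
  match typo with
  | [] => ct
  | (_, cw, s, e) :: rest => if s ≤ p ∧ p < e then cw else pvInnerA rest p ct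

def obtain_correct_tokens_py (typo : List (String × String × Int × Int)) (text2token : List (Option Int)) (tokens : List String) : List String :=
  (PySem.List.enumerate text2token 0).foldl (fun cts pt =>
    match pt.2 with
    | none => cts
    | some i =>
      let ct := pvInnerA typo pt.1 (PySem.List.pyGetD tokens i "")
      if (cts.length : Int) ≤ i then cts ++ [ct] else cts) []

-- ===== PORT B =====
-- 'for p in range(max(start,0), min(end,n)): if fix[p] is None: fix[p] = correct_word'
def pvFill (fix : List (Option String)) (cw : String) (a b : Int) : List (Option String) :=
  (PySem.List.pyRange a b 1).foldl (fun arr p =>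
    if PySem.List.pyGetD arr p none = none then PySem.List.pySetD arr p (some cw) else arr) fix

def pvBuildFix (typo : List (String × String × Int × Int)) (n : Int) : List (Option String) :=
  typo.foldl (fun arr t => pvFill arr t.2.1 (max t.2.2.1 0) (min t.2.2.2 n))
    (List.replicate n.toNat none)

def obtain_correct_tokens_py_alt (typo : List (String × String × Int × Int)) (text2token : List (Option Int)) (tokens : List String) : List String :=
  let fix := pvBuildFix typo (text2token.length : Int)
  (PySem.List.enumerate text2token 0).foldl (fun cts pt =>
    match pt.2 with
    | none => cts
    | some i =>
      if (cts.length : Int) ≤ i then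
        cts ++ [match PySem.List.pyGetD fix pt.1 none with
                | some cw => cw
                | none => PySem.List.pyGetD tokens i ""]
      else cts) []

-- ===== PRECONDITION & SPEC =====
-- Pre_ excludes exactly the inputs on which A raises IndexError: a non-None
-- entry of text2token that is out of range as an index into tokens.
def Pre_obtain_correct_tokens_py (typo : List (String × String × Int × Int)) (text2token : List (Option Int)) (tokens : List String) : Prop :=
  text2token.all (fun o => o.all (fun i => decide (PySem.Raise.InRange tokens.length i))) = true
instance (typo : List (String × String × Int × Int)) (text2token : List (Option Int)) (tokens : List String) : Decidable (Pre_obtain_correct_tokens_py typo text2token tokens) := by unfold Pre_obtain_correct_tokens_py; infer_instance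

def pvWitness_obtain_correct_tokens_py : (List (String × String × Int × Int)) × List (Option Int) × List String :=
  ([("ab", "cd", 1, 3)], [some 0, none, some 1, some 0], ["x", "y"])

def Spec_obtain_correct_tokens_py (typo : List (String × String × Int × Int)) (text2token : List (Option Int)) (tokens : List String) (out : List String) : Prop := out = obtain_correct_tokens_py_alt typo text2token tokens
instance (typo : List (String × String × Int × Int)) (text2token : List (Option Int)) (tokens : List String) (out : List String) : Decidable (Spec_obtain_correct_tokens_py typo text2token tokens out) := by unfold Spec_obtain_correct_tokens_py; infer_instance

-- ===== CLAIM (what is proved, stated in full; the proofs are below) =====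
def Claim_equal_obtain_correct_tokens_py : Prop := ∀ (typo : List (String × String × Int × Int)) (text2token : List (Option Int)) (tokens : List String), Dom_obtain_correct_tokens_py typo text2token tokens → Pre_obtain_correct_tokens_py typo text2token tokens → Spec_obtain_correct_tokens_py typo text2token tokens (obtain_correct_tokens_py typo text2token tokens)

-- ===== LEMMAS AND PROOFS =====

-- first typo interval covering position p, as an Option
def pvFirst (typo : List (String × String × Int × Int)) (p : Int) : Option String :=
  match typo with
  | [] => none
  | (_, cw, s, e) :: rest => if s ≤ p ∧ p < e then some cw else pvFirst rest p

theorem pvInnerA_eq_first (typo : List (String × String × Int × Int)) (p : Int) (ct : String) :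
    pvInnerA typo p ct = (pvFirst typo p).getD ct := by
  induction typo with
  | nil => rfl
  | cons h t ih =>
    obtain ⟨tw, cw, s, e⟩ := h
    simp [pvInnerA, pvFirst]
    split_ifs <;> simp [ih]

theorem pvFill_length (fix : List (Option String)) (cw : String) (a b : Int) :
    (pvFill fix cw a b).length = fix.length := by
  unfold pvFill
  generalize PySem.List.pyRange a b 1 = l
  induction l generalizing fix with
  | nil => rfl
  | cons p t ih =>
    simp only [List.foldl_cons]
    rw [ih]
    split
    · simp [PySem.List.length_pySetD]
    · rfl

theorem pvFill_getD (fix : List (Option String)) (cw : String) (a b : Int)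
    (ha : 0 ≤ a) (hb : b ≤ (fix.length : Int)) (q : Nat) (hq : q < fix.length) :
    (pvFill fix cw a b).getD q none =
      if fix.getD q none = none ∧ a ≤ (q : Int) ∧ (q : Int) < b then some cw
      else fix.getD q none := by
  generalize hk : (b - a).toNat = k
  induction k generalizing a fix with
  | zero =>
    have hba : b ≤ a := by omega
    unfold pvFill
    rw [PySem.List.pyRange_one_eq_nil hba]
    simp only [List.foldl_nil]
    rw [if_neg]
    rintro ⟨-, h1, h2⟩; omega
  | succ k ih =>
    have hab : a < b := by omega
    unfold pvFill
    rw [PySem.List.pyRange_one_cons hab]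
    simp only [List.foldl_cons]
    have haL : a < (fix.length : Int) := lt_of_lt_of_le hab hb
    have hget : PySem.List.pyGetD fix a none = fix[a.toNat] :=
      PySem.List.pyGetD_eq_getElem fix none ha haL
    set fix1 := (if PySem.List.pyGetD fix a none = none
        then PySem.List.pySetD fix a (some cw) else fix) with hfix1
    have hlen1 : fix1.length = fix.length := by
      rw [hfix1]; split
      · simp [PySem.List.length_pySetD]
      · rfl
    have ihres : (pvFill fix1 cw (a+1) b).getD q none =
        if fix1.getD q none = none ∧ a + 1 ≤ (q : Int) ∧ (q : Int) < b then some cw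
        else fix1.getD q none := by
      exact ih fix1 (a+1) (by omega) (by rw [hlen1]; omega) (by omega) (by omega)
    have hunf : (PySem.List.pyRange (a+1) b 1).foldl
        (fun arr p => if PySem.List.pyGetD arr p none = none
          then PySem.List.pySetD arr p (some cw) else arr) fix1 =
        pvFill fix1 cw (a+1) b := rfl
    rw [hunf, ihres]
    have hfixq : fix.getD q none = fix[q] := by
      rw [List.getD_eq_getElem?_getD, List.getElem?_eq_getElem hq]; rfl
    have hset : ∀ v : Option String, (fix.set a.toNat v).getD q none =
        if a.toNat = q then v else fix[q] := by
      intro v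
      rw [List.getD_eq_getElem?_getD]
      by_cases h : a.toNat = q
      · subst h; rw [List.getElem?_set_self (by omega)]; simp
      · rw [List.getElem?_set_ne h, List.getElem?_eq_getElem hq]; simp [h]
    have hfq : fix1.getD q none =
        if fix[a.toNat] = none ∧ a.toNat = q then some cw else fix[q] := by
      rw [hfix1, hget]
      by_cases h0 : fix[a.toNat] = none
      · rw [if_pos h0, PySem.List.pySetD_of_nonneg fix (some cw) ha, hset]
        by_cases h1 : a.toNat = q
        · rw [if_pos h1, if_pos ⟨h0, h1⟩]
        · rw [if_neg h1, if_neg (by rintro ⟨-, h⟩; exact h1 h)]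
      · rw [if_neg h0, if_neg (by rintro ⟨h, -⟩; exact h0 h), hfixq]
    by_cases haq : a.toNat = q
    · have hfa : fix[a.toNat] = fix[q] := by congr 1
      by_cases hn0 : fix[q] = none
      · have hv : fix1.getD q none = some cw := by
          rw [hfq, if_pos ⟨hfa.trans hn0, haq⟩]
        rw [hv, hfixq]
        have h1 : a ≤ (q:Int) := by omega
        have h2 : (q:Int) < b := by omega
        simp [hn0, h1, h2]
      · have hv : fix1.getD q none = fix[q] := by
          rw [hfq, if_neg (by rintro ⟨h, -⟩; exact hn0 (hfa ▸ h))]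
        rw [hv, hfixq]
        simp [hn0]
    · have hv : fix1.getD q none = fix[q] := by
        rw [hfq, if_neg (by rintro ⟨-, h⟩; exact haq h)]
      rw [hv, hfixq]
      by_cases hn0 : fix[q] = none
      · have hiff : (a < (q:Int) ∧ (q:Int) < b) ↔ (a ≤ (q:Int) ∧ (q:Int) < b) := by omega
        simp [hn0, hiff]
      · simp [hn0]


theorem pvBuildFix_aux (n : Int) (hn : 0 ≤ n)
    (typo : List (String × String × Int × Int)) (arr : List (Option String))
    (hlen : (arr.length : Int) = n) (q : Nat) (hq : (q : Int) < n) :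
    (typo.foldl (fun arr t => pvFill arr t.2.1 (max t.2.2.1 0) (min t.2.2.2 n)) arr).getD q none
      = (arr.getD q none).or (pvFirst typo q) := by
  induction typo generalizing arr with
  | nil => simp [pvFirst]
  | cons h t ih =>
    obtain ⟨tw, cw, s, e⟩ := h
    simp only [List.foldl_cons]
    rw [ih _ (by rw [pvFill_length]; exact hlen)]
    rw [pvFill_getD arr cw _ _ (by omega) (by omega) q (by omega)]
    simp only [pvFirst]
    by_cases hnone : arr.getD q none = none
    · rw [hnone]
      have hiff : ((none : Option String) = none ∧ max s 0 ≤ (q : Int) ∧ (q : Int) < min e n)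
          ↔ (s ≤ (q : Int) ∧ (q : Int) < e) := by
        constructor
        · rintro ⟨-, h1, h2⟩; exact ⟨by omega, by omega⟩
        · rintro ⟨h1, h2⟩; exact ⟨rfl, by omega, by omega⟩
      rw [if_congr hiff rfl rfl]
      by_cases hc : s ≤ (q : Int) ∧ (q : Int) < e
      · rw [if_pos hc, if_pos hc]; simp
      · rw [if_neg hc, if_neg hc]
    · obtain ⟨x, hx⟩ := Option.ne_none_iff_exists'.mp hnone
      rw [hx, if_neg (by rintro ⟨h, -⟩; exact Option.some_ne_none x h)]
      simp [Option.some_or]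

theorem pvBuildFix_getD (typo' : List (String × String × Int × Int)) (n : Int)
    (q : Nat) (hq : (q : Int) < n) :
    (pvBuildFix typo' n).getD q none = pvFirst typo' q := by
  have hn : 0 ≤ n := by omega
  unfold pvBuildFix
  rw [pvBuildFix_aux n hn typo' _ (by simp; omega) q hq]
  rw [List.getD_eq_getElem?_getD, List.getElem?_replicate_of_lt (by omega)]
  rfl

theorem obtain_correct_tokens_py_spec : Claim_equal_obtain_correct_tokens_py := by
  intro typo text2token tokens _ _
  unfold Spec_obtain_correct_tokens_py obtain_correct_tokens_py obtain_correct_tokens_py_alt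
  apply PySem.List.foldl_congr_mem
  intro cts pt hmem
  obtain ⟨k, hk, hpt⟩ := (PySem.List.mem_enumerate_iff _ _ _).mp hmem
  match hpt2 : pt.2 with
  | none => rfl
  | some i =>
    simp only []
    have hp1 : pt.1 = (k : Int) := by rw [hpt]; simp
    have hfix : PySem.List.pyGetD (pvBuildFix typo (text2token.length : Int)) pt.1 none
        = pvFirst typo (k : Int) := by
      rw [hp1, PySem.List.pyGetD_natCast, pvBuildFix_getD _ _ k (by exact_mod_cast hk)]
    rw [pvInnerA_eq_first, hfix, hp1]
    cases pvFirst typo (k : Int) <;> rfl
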